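-- pv_equiv track=rewrite | github.com/kimjiil/Algorithm_study | Programmers/level3/number_game.py | solution
-- ===== SOURCE A (Python) =====
-- import heapq
--
-- def solution(A, B):
--     # A보다 크면서 B에서 최소값
--     heap_a = []
--     heap_b = []
--
--     for a, b in zip(A, B):
--         heapq.heappush(heap_a, a)
--         heapq.heappush(heap_b, b)
--
--     win_list = []
--     while len(heap_a) > 0 and len(heap_b) > 0:
--         #각각에서 최소값을 뽑고
--         a = heapq.heappop(heap_a)
--         b = heapq.heappop(heap_b)
--
--         # a보다 크면서 b에서 최소값을 찾아야됨
--         while a >= b and len(heap_b) > 0: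
--             b = heapq.heappop(heap_b)
--         if a < b:
--             win_list.append([a, b])
--
--     return len(win_list)
-- ===== SOURCE B (Python) =====
-- def solution(A, B):
--     # Hall-deficiency closed form: wins = min over i of (i + #{b in sorted B[:m] : b > sa[i]}),
--     # capped at m; no matching is simulated.
--     m = min(len(A), len(B))
--     sa = sorted(A[:m])
--     sb = sorted(B[:m])
--     best = m
--     for i, v in enumerate(sa):
--         lo, hi = 0, m
--         while lo < hi:  # hand-rolled bisect_right(sb, v)
--             mid = (lo + hi) // 2
--             if sb[mid] <= v:
--                 lo = mid + 1
--             else: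
--                 hi = mid
--         best = min(best, i + (m - lo))
--     return best
-- ===== Notes on version B (the rewrite author's own statement) =====
-- stated objective: alternative
-- what changed: Replaces the heap-based greedy matching simulation by a Hall-deficiency closed form: the answer is computed as min(m, min over i of i + #{b in B[:m] : b > sorted(A[:m])[i]}) with a hand-rolled binary search per element, so no matching is simulated and nothing is consumed.
import Mathlib
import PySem

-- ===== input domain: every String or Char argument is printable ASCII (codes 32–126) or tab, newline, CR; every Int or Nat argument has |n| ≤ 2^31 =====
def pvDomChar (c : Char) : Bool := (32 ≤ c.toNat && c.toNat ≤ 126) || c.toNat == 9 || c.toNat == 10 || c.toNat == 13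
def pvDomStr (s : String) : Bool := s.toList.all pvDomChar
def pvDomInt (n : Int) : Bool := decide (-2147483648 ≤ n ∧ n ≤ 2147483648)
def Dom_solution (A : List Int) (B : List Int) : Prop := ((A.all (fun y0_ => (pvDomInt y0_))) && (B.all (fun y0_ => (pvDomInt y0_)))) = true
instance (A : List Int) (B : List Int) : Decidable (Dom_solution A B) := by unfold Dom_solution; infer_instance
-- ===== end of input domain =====

-- B replaces the heap-greedy matching by the Hall-deficiency closed form
-- min(m, min_i (i + #{b > sorted(A[:m])[i]})) (binary search per element); same results, different algorithm.

-- ===== PORT A =====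
-- heapq over Int modeled by value: heappush keeps the pending values in min-first order
-- (PySem.List.insertBy with `a < b`), heappop takes the head — exact for the popped VALUES,
-- which is all A uses (Int ties are identical values, so pop order of equals is irrelevant).

-- inner `while a >= b and len(heap_b) > 0: b = heappop(heap_b)`
def innerW (a : Int) (b : Int) (hb : List Int) : Int × List Int :=
  match hb with
  | [] => (b, [])
  | b' :: t => if b ≤ a then innerW a b' t else (b, b' :: t)

-- outer `while len(heap_a) > 0 and len(heap_b) > 0` loop, accumulating win_list
def loopA : List Int → List Int → List (Int × Int) → List (Int × Int)
  | [], _, w => w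
  | _ :: _, [], w => w
  | a :: ta, b :: tb, w =>
    let r := innerW a b tb
    if a < r.1 then loopA ta r.2 (w ++ [(a, r.1)]) else loopA ta r.2 w

def solution (A : List Int) (B : List Int) : Int :=
  -- for a, b in zip(A, B): heappush(heap_a, a); heappush(heap_b, b)
  let hs := (A.zip B).foldl
    (fun (s : List Int × List Int) p =>
      (PySem.List.insertBy (fun a b => decide (a < b)) p.1 s.1,
       PySem.List.insertBy (fun a b => decide (a < b)) p.2 s.2))
    ([], [])
  ((loopA hs.1 hs.2 []).length : Int)

-- ===== PORT B =====
-- `while lo < hi: mid=(lo+hi)//2; if sb[mid] <= v: lo=mid+1 else: hi=mid` (guard keeps mid in range)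
def bsr (sb : List Int) (v : Int) (lo hi : Nat) : Nat :=
  if h : lo < hi then
    if sb.getD ((lo + hi) / 2) 0 ≤ v then bsr sb v ((lo + hi) / 2 + 1) hi
    else bsr sb v lo ((lo + hi) / 2)
  else lo
termination_by hi - lo
decreasing_by all_goals omega

def solution_alt (A : List Int) (B : List Int) : Int :=
  let m := min A.length B.length
  let sa := PySem.List.sorted (A.take m) (fun x => x) false   -- sorted(A[:m]); m ≥ 0 so the slice is `take`
  let sb := PySem.List.sorted (B.take m) (fun x => x) false
  -- for i, v in enumerate(sa): best = min(best, i + (m - lo)) with lo the binary-search result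
  (PySem.List.enumerate sa 0).foldl
    (fun best p => min best (p.1 + ((m : Int) - (bsr sb p.2 0 m : Int)))) (m : Int)

-- ===== PRECONDITION & SPEC =====
def Spec_solution (A : List Int) (B : List Int) (out : Int) : Prop := out = solution_alt A B
instance (A : List Int) (B : List Int) (out : Int) : Decidable (Spec_solution A B out) := by unfold Spec_solution; infer_instance

-- ===== CLAIM (what is proved, stated in full; the proofs are below) =====
def Claim_equal_solution : Prop := ∀ (A : List Int) (B : List Int), Dom_solution A B → Spec_solution A B (solution A B)

-- ===== LEMMAS AND PROOFS =====

-- middle spec 1: greedy count over two lists, consuming B's prefix ≤ a before each match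
def gcount : List Int → List Int → Int
  | [], _ => 0
  | a :: ta, sb =>
    match sb.dropWhile (fun x => decide (x ≤ a)) with
    | [] => 0
    | _ :: rest => 1 + gcount ta rest

-- middle spec 2: the Hall-deficiency closed form, F sa sb = min(|sa|, min_i (i + #{b ∈ sb : b > sa[i]}))
def cntGt (sb : List Int) (v : Int) : Nat := sb.countP (fun b => decide (v < b))

def F : List Int → List Int → Int
  | [], _ => 0
  | a :: ta, sb => min ((cntGt sb a : Int)) (1 + F ta sb)

lemma gcount_nil_right (sa : List Int) : gcount sa [] = 0 := by
  cases sa <;> simp [gcount]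

lemma innerW_of_dropWhile_nil (a : Int) :
    ∀ (tb : List Int) (b : Int),
      (b :: tb).dropWhile (fun x => decide (x ≤ a)) = [] →
      (innerW a b tb).2 = [] ∧ (innerW a b tb).1 ≤ a := by
  intro tb
  induction tb with
  | nil =>
    intro b h
    simp [List.dropWhile] at h
    by_cases hb : b ≤ a
    · simp [innerW, hb]
    · simp [hb] at h
  | cons b1 t ih =>
    intro b h
    rw [List.dropWhile_cons] at h
    by_cases hb : b ≤ a
    · rw [if_pos (by simpa using hb)] at h
      simpa [innerW, hb] using ih b1 h
    · rw [if_neg (by simpa using hb)] at h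
      exact absurd h (by simp)

lemma innerW_of_dropWhile_cons (a : Int) :
    ∀ (tb : List Int) (b b' : Int) (rest : List Int),
      (b :: tb).dropWhile (fun x => decide (x ≤ a)) = b' :: rest →
      innerW a b tb = (b', rest) := by
  intro tb
  induction tb with
  | nil =>
    intro b b' rest h
    by_cases hb : b ≤ a
    · simp [List.dropWhile, hb] at h
    · simp [List.dropWhile, hb] at h
      obtain ⟨rfl, rfl⟩ := h
      simp [innerW]
  | cons b1 t ih =>
    intro b b' rest h
    rw [List.dropWhile_cons] at h
    by_cases hb : b ≤ a
    · rw [if_pos (by simpa using hb)] at h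
      simpa [innerW, hb] using ih b1 b' rest h
    · rw [if_neg (by simpa using hb)] at h
      obtain ⟨rfl, rfl⟩ := List.cons.injEq .. ▸ h
      simp [innerW, hb]

lemma loopA_nil_right (ta : List Int) (w : List (Int × Int)) : loopA ta [] w = w := by
  cases ta <;> rfl

lemma loopA_len (sa : List Int) :
    ∀ (sb : List Int) (w : List (Int × Int)),
      ((loopA sa sb w).length : Int) = (w.length : Int) + gcount sa sb := by
  induction sa with
  | nil => intro sb w; simp [loopA, gcount]
  | cons a ta ih =>
    intro sb w
    cases sb with
    | nil => simp [loopA, gcount_nil_right]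
    | cons b tb =>
      rcases hdw : (b :: tb).dropWhile (fun x => decide (x ≤ a)) with _ | ⟨b', rest⟩
      · obtain ⟨h2, h1⟩ := innerW_of_dropWhile_nil a tb b hdw
        have hlt : ¬ a < (innerW a b tb).1 := by omega
        simp [loopA, hlt, h2, loopA_nil_right, gcount, hdw]
      · have he := innerW_of_dropWhile_cons a tb b b' rest hdw
        have hb' : a < b' := by
          have := List.head?_dropWhile_not (p := fun x => decide (x ≤ a)) (l := b :: tb)
          rw [hdw] at this
          simp at this
          omega
        simp only [loopA, he, if_pos hb', gcount, hdw]
        rw [ih rest (w ++ [(a, b')])]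
        simp
        omega

lemma map_fst_zip_take : ∀ (A B : List Int), (A.zip B).map Prod.fst = A.take B.length := by
  intro A
  induction A with
  | nil => intro B; simp
  | cons a ta ih =>
    intro B
    cases B with
    | nil => simp
    | cons b tb => simp [ih tb]

lemma map_snd_zip_take : ∀ (A B : List Int), (A.zip B).map Prod.snd = B.take A.length := by
  intro A
  induction A with
  | nil => intro B; simp
  | cons a ta ih =>
    intro B
    cases B with
    | nil => simp
    | cons b tb => simp [ih tb]

-- ---------- greedy = deficiency formula ----------

lemma F_nonneg : ∀ (sa sb : List Int), 0 ≤ F sa sb := by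
  intro sa
  induction sa with
  | nil => intro sb; simp [F]
  | cons a ta ih =>
    intro sb
    have := ih sb
    simp only [F]
    omega

lemma F_le_length : ∀ (sa sb : List Int), F sa sb ≤ (sa.length : Int) := by
  intro sa
  induction sa with
  | nil => intro sb; simp [F]
  | cons a ta ih =>
    intro sb
    have := ih sb
    simp only [F, List.length_cons]
    push_cast
    omega

-- on a sorted list, dropping the prefix ≤ a is filtering to the elements > a
lemma dropWhile_sorted_eq_filter (a : Int) :
    ∀ (sb : List Int), sb.Pairwise (· ≤ ·) →
      sb.dropWhile (fun x => decide (x ≤ a)) = sb.filter (fun x => decide (a < x)) := by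
  intro sb
  induction sb with
  | nil => intro _; simp
  | cons b t ih =>
    intro hs
    rw [List.pairwise_cons] at hs
    by_cases hb : b ≤ a
    · rw [List.dropWhile_cons, if_pos (by simpa using hb), List.filter_cons,
        if_neg (by simpa using (by omega : ¬ a < b))]
      exact ih hs.2
    · rw [List.dropWhile_cons, if_neg (by simpa using hb), List.filter_cons,
        if_pos (by simpa using (by omega : a < b))]
      rw [List.filter_eq_self.mpr]
      intro x hx
      have := hs.1 x hx
      simp
      omega

lemma countP_gt_filter (a x : Int) (hax : a ≤ x) :
    ∀ (sb : List Int),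
      sb.countP (fun b => decide (x < b)) =
      (sb.filter (fun b => decide (a < b))).countP (fun b => decide (x < b)) := by
  intro sb
  induction sb with
  | nil => simp
  | cons b t ih =>
    by_cases hb : a < b
    · rw [List.filter_cons, if_pos (by simpa using hb), List.countP_cons, List.countP_cons, ih]
    · have hxb : ¬ x < b := by omega
      rw [List.filter_cons, if_neg (by simpa using hb), List.countP_cons,
        if_neg (by simpa using hxb), ih]
      simp

lemma shift_lemma (a b0 : Int) (rest sb : List Int)
    (hsb : sb.Pairwise (· ≤ ·))
    (hd : sb.filter (fun x => decide (a < x)) = b0 :: rest) :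
    ∀ ta : List Int, (∀ x ∈ ta, a ≤ x) →
      min (1 + (rest.length : Int)) (1 + F ta sb) = 1 + F ta rest := by
  have hrest : ∀ y ∈ rest, b0 ≤ y := by
    have hp : (b0 :: rest).Pairwise (· ≤ ·) := hd ▸ hsb.filter _
    exact (List.pairwise_cons.mp hp).1
  intro ta
  induction ta with
  | nil =>
    intro _
    simp only [F]
    omega
  | cons x t ih =>
    intro hall
    have hax : a ≤ x := hall x (by simp)
    have ih' := ih (fun y hy => hall y (by simp [hy]))
    have hcnt : cntGt sb x = (if x < b0 then 1 else 0) + cntGt rest x := by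
      unfold cntGt
      rw [countP_gt_filter a x hax sb, hd, List.countP_cons]
      by_cases hb : x < b0
      · simp [hb]
        omega
      · simp [hb]
    have hcle : cntGt rest x ≤ rest.length := List.countP_le_length
    have hfull : x < b0 → cntGt rest x = rest.length := by
      intro hb
      unfold cntGt
      rw [List.countP_eq_length]
      intro y hy
      have := hrest y hy
      simp
      omega
    simp only [F]
    by_cases hb : x < b0
    · have := hfull hb
      rw [hcnt]
      simp only [if_pos hb]
      push_cast
      omega
    · rw [hcnt]
      simp only [if_neg hb]
      push_cast
      omega

lemma gcount_eq_F : ∀ (sa sb : List Int), sa.Pairwise (· ≤ ·) → sb.Pairwise (· ≤ ·) →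
    gcount sa sb = F sa sb := by
  intro sa
  induction sa with
  | nil => intro sb _ _; rfl
  | cons a ta ih =>
    intro sb hsa hsb
    rw [List.pairwise_cons] at hsa
    have hdf := dropWhile_sorted_eq_filter a sb hsb
    rcases hd : sb.filter (fun x => decide (a < x)) with _ | ⟨b0, rest⟩
    · have hg : gcount (a :: ta) sb = 0 := by
        simp only [gcount, hdf, hd]
      have hc : cntGt sb a = 0 := by
        unfold cntGt
        rw [List.countP_eq_length_filter, hd]
        rfl
      have := F_nonneg ta sb
      rw [hg]
      simp only [F, hc]
      omega
    · have hrs : rest.Pairwise (· ≤ ·) := by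
        have hp : (b0 :: rest).Pairwise (· ≤ ·) := hd ▸ hsb.filter _
        exact (List.pairwise_cons.mp hp).2
      have hg : gcount (a :: ta) sb = 1 + gcount ta rest := by
        simp only [gcount, hdf, hd]
      have hc : (cntGt sb a : Int) = 1 + (rest.length : Int) := by
        unfold cntGt
        rw [List.countP_eq_length_filter, hd]
        push_cast [List.length_cons]
        ring
      rw [hg, ih rest hsa.2 hrs]
      simp only [F, hc]
      exact (shift_lemma a b0 rest sb hsb hd ta hsa.1).symm

-- ---------- binary search computes the count ----------

lemma bsr_inv (sb : List Int) (hs : sb.Pairwise (· ≤ ·)) (v : Int) :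
    ∀ (n lo hi : Nat), hi - lo ≤ n → lo ≤ hi → hi ≤ sb.length →
      (∀ k, k < lo → sb.getD k 0 ≤ v) →
      (∀ k, hi ≤ k → k < sb.length → v < sb.getD k 0) →
      bsr sb v lo hi ≤ sb.length ∧
      (∀ k, k < bsr sb v lo hi → sb.getD k 0 ≤ v) ∧
      (∀ k, bsr sb v lo hi ≤ k → k < sb.length → v < sb.getD k 0) := by
  intro n
  induction n with
  | zero =>
    intro lo hi hn hlh hhl hlow hhigh
    have : ¬ lo < hi := by omega
    rw [bsr, dif_neg this]
    exact ⟨by omega, hlow, fun k hk hkl => hhigh k (by omega) hkl⟩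
  | succ n ih =>
    intro lo hi hn hlh hhl hlow hhigh
    by_cases h : lo < hi
    · rw [bsr, dif_pos h]
      have hmid : (lo + hi) / 2 < hi := by omega
      have hmlo : lo ≤ (lo + hi) / 2 := by omega
      have hmlen : (lo + hi) / 2 < sb.length := by omega
      by_cases hle : sb.getD ((lo + hi) / 2) 0 ≤ v
      · rw [if_pos hle]
        apply ih ((lo + hi) / 2 + 1) hi (by omega) (by omega) hhl
        · intro k hk
          by_cases hklo : k < lo
          · exact hlow k hklo
          · have hkm : k ≤ (lo + hi) / 2 := by omega
            rcases Nat.lt_or_ge k ((lo + hi) / 2) with hkm' | hkm'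
            · have hmono : sb[k]'(by omega) ≤ sb[(lo + hi) / 2]'hmlen :=
                List.pairwise_iff_getElem.mp hs k ((lo + hi) / 2) (by omega) hmlen hkm'
              rw [List.getD_eq_getElem sb 0 (by omega)]
              rw [List.getD_eq_getElem sb 0 hmlen] at hle
              omega
            · have : k = (lo + hi) / 2 := by omega
              rw [this]; exact hle
        · exact hhigh
      · rw [if_neg hle]
        apply ih lo ((lo + hi) / 2) (by omega) (by omega) (by omega) hlow
        intro k hk hkl
        rcases Nat.lt_or_ge k hi with hkh | hkh
        · rcases Nat.lt_or_ge ((lo + hi) / 2) k with hmk | hmk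
          · have hmono : sb[(lo + hi) / 2]'hmlen ≤ sb[k]'hkl :=
              List.pairwise_iff_getElem.mp hs ((lo + hi) / 2) k hmlen hkl hmk
            rw [List.getD_eq_getElem sb 0 hkl]
            rw [List.getD_eq_getElem sb 0 hmlen] at hle
            omega
          · have : k = (lo + hi) / 2 := by omega
            rw [this]; omega
        · exact hhigh k hkh hkl
    · rw [bsr, dif_neg h]
      exact ⟨by omega, hlow, fun k hk hkl => hhigh k (by omega) hkl⟩

lemma count_of_split (sb : List Int) (v : Int) (r : Nat) (hr : r ≤ sb.length)
    (hlow : ∀ k, k < r → sb.getD k 0 ≤ v)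
    (hhigh : ∀ k, r ≤ k → k < sb.length → v < sb.getD k 0) :
    (cntGt sb v : Int) = (sb.length : Int) - r := by
  unfold cntGt
  conv_lhs => rw [← List.take_append_drop r sb]
  rw [List.countP_append]
  have h1 : (sb.take r).countP (fun b => decide (v < b)) = 0 := by
    rw [List.countP_eq_zero]
    intro x hx
    obtain ⟨i, hi, hix⟩ := List.mem_iff_getElem.mp hx
    have hilen : i < r := by
      have := List.length_take_le r sb
      omega
    have : (sb.take r)[i] = sb[i]'(by omega) := List.getElem_take
    have hle := hlow i hilen
    rw [List.getD_eq_getElem sb 0 (by omega)] at hle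
    simp only [this] at hix
    simp
    omega
  have h2 : (sb.drop r).countP (fun b => decide (v < b)) = (sb.drop r).length := by
    rw [List.countP_eq_length]
    intro x hx
    obtain ⟨i, hi, hix⟩ := List.mem_iff_getElem.mp hx
    have : (sb.drop r)[i] = sb[r + i]'(by simp at hi; omega) := List.getElem_drop
    have hgt := hhigh (r + i) (by omega) (by simp at hi; omega)
    rw [List.getD_eq_getElem sb 0 (by simp at hi; omega)] at hgt
    simp only [this] at hix
    simp
    omega
  rw [h1, h2]
  simp
  omega

-- ---------- the B-side fold computes F ----------

lemma foldE (sb : List Int) :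
    ∀ (sa : List Int) (s best : Int), best ≤ s + sa.length →
      (PySem.List.enumerate sa s).foldl
        (fun b p => min b (p.1 + (cntGt sb p.2 : Int))) best
      = min best (s + F sa sb) := by
  intro sa
  induction sa with
  | nil =>
    intro s best h
    simp only [PySem.List.enumerate_nil, List.foldl_nil, F]
    simp at h
    omega
  | cons a ta ih =>
    intro s best h
    rw [PySem.List.enumerate_cons, List.foldl_cons]
    rw [ih (s + 1) (min best (s + (cntGt sb a : Int))) (by simp at h ⊢; omega)]
    simp only [F]
    omega

-- ===== VERDICT (by name: the statement is the Claim_ definition above) =====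
theorem solution_spec : Claim_equal_solution := by
  intro A B _
  unfold Spec_solution solution solution_alt
  rw [PySem.List.foldl_prod_mk
    (f := fun s p => PySem.List.insertBy (fun a b => decide (a < b)) (Prod.fst p) s)
    (g := fun s p => PySem.List.insertBy (fun a b => decide (a < b)) (Prod.snd p) s)]
  have hka : (A.zip B).foldl (fun s p => PySem.List.insertBy (fun a b => decide (a < b)) (Prod.fst p) s) []
      = PySem.List.sorted (A.take (min A.length B.length)) (fun x => x) false := by
    rw [PySem.List.sorted_eq_foldl_insertBy,
      ← List.foldl_map (f := (Prod.fst : Int × Int → Int))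
        (g := fun acc x => PySem.List.insertBy (fun a b => decide (a < b)) x acc)]
    rw [map_fst_zip_take]
    congr 1
    rw [List.take_eq_take_iff]
    omega
  have hkb : (A.zip B).foldl (fun s p => PySem.List.insertBy (fun a b => decide (a < b)) (Prod.snd p) s) []
      = PySem.List.sorted (B.take (min A.length B.length)) (fun x => x) false := by
    rw [PySem.List.sorted_eq_foldl_insertBy,
      ← List.foldl_map (f := (Prod.snd : Int × Int → Int))
        (g := fun acc x => PySem.List.insertBy (fun a b => decide (a < b)) x acc)]
    rw [map_snd_zip_take]
    congr 1
    rw [List.take_eq_take_iff]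
    omega
  simp only [hka, hkb]
  set m := min A.length B.length with hm
  set sa := PySem.List.sorted (A.take m) (fun x => x) false with hsadef
  set sb := PySem.List.sorted (B.take m) (fun x => x) false with hsbdef
  have hsa : sa.Pairwise (· ≤ ·) := by rw [hsadef]; exact PySem.List.sorted_pairwise _ _
  have hsb : sb.Pairwise (· ≤ ·) := by rw [hsbdef]; exact PySem.List.sorted_pairwise _ _
  have hlsa : sa.length = m := by
    rw [hsadef, PySem.List.length_sorted, List.length_take]
    omega
  have hlsb : sb.length = m := by
    rw [hsbdef, PySem.List.length_sorted, List.length_take]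
    omega
  have hfun : (fun (best : Int) (p : Int × Int) =>
        min best (p.1 + ((m : Int) - (bsr sb p.2 0 m : Nat)))) =
      (fun (best : Int) (p : Int × Int) => min best (p.1 + (cntGt sb p.2 : Int))) := by
    funext best p
    have hinv := bsr_inv sb hsb p.2 m 0 m (by omega) (by omega) (by omega)
      (by intro k hk; omega) (by intro k hk hkl; omega)
    obtain ⟨h1, h2, h3⟩ := hinv
    have := count_of_split sb p.2 (bsr sb p.2 0 m) h1 h2 h3
    rw [hlsb] at this
    rw [this]
  rw [hfun]
  rw [loopA_len sa sb []]
  rw [foldE sb sa 0 (m : Int) (by rw [hlsa]; omega)]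
  rw [gcount_eq_F sa sb hsa hsb]
  have hfl := F_le_length sa sb
  have hfn := F_nonneg sa sb
  rw [hlsa] at hfl
  simp only [List.length_nil]
  push_cast
  omega
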